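-- pv_equiv track=rewrite | github.com/cfe-lab/proviral | scripts/compare_runs.py | _find_unique_value_columns
-- ===== SOURCE A (Python) =====
-- from typing import Dict, List, Optional, Any
--
-- def _find_unique_value_columns(csv_data: List[List[str]]) -> List[str]:
--     """
--     Find all columns that have unique values (no duplicates).
--
--     Args:
--         csv_data: List of rows, where each row is a list of values
--
--     Returns:
--         List of column names that contain only unique values
--     """
--     if not csv_data or len(csv_data) < 2:  # Need at least header + 1 data row
--         return []
--
--     unique_columns = []
--     headers = csv_data[0] if csv_data else []
--     num_columns = len(headers)
--
--     for col_idx in range(num_columns):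
--         # Extract all values from this column (skip header row)
--         column_values = []
--         for row_idx in range(1, len(csv_data)):  # Skip header
--             if col_idx < len(csv_data[row_idx]):
--                 value = csv_data[row_idx][col_idx].strip()
--                 if value:  # Only consider non-empty values
--                     column_values.append(value)
--
--         # Check if all values are unique
--         if len(column_values) > 0 and len(column_values) == len(set(column_values)):
--             col_name = (
--                 headers[col_idx] if col_idx < len(headers) else f"column_{col_idx}"
--             )
--             unique_columns.append(col_name)
--
--     return unique_columns
-- ===== SOURCE B (Python) =====
-- from typing import List
--
-- def _find_unique_value_columns(csv_data: List[List[str]]) -> List[str]: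
--     """Row-major single pass: per-column (seen-set, duplicate flag, nonempty flag)."""
--     if not csv_data or len(csv_data) < 2:
--         return []
--     headers = csv_data[0]
--     state = [[set(), False, False] for _ in headers]  # seen, has_dup, has_value
--     for row in csv_data[1:]:
--         for st, cell in zip(state, row):
--             v = cell.strip()
--             if not v:
--                 continue
--             if v in st[0]:
--                 st[1] = True
--             else:
--                 st[0].add(v)
--                 st[2] = True
--     return [h for h, (_, dup, nonempty) in zip(headers, state) if nonempty and not dup]
-- ===== Notes on version B (the rewrite author's own statement) =====
-- stated objective: idiomatic
-- what changed: Replaced the column-major nested scan (rebuilding each column's value list and a set per column) with a single row-major pass maintaining per-column state (seen set, duplicate flag, nonempty flag), then one final filter of the headers.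
import Mathlib
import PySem

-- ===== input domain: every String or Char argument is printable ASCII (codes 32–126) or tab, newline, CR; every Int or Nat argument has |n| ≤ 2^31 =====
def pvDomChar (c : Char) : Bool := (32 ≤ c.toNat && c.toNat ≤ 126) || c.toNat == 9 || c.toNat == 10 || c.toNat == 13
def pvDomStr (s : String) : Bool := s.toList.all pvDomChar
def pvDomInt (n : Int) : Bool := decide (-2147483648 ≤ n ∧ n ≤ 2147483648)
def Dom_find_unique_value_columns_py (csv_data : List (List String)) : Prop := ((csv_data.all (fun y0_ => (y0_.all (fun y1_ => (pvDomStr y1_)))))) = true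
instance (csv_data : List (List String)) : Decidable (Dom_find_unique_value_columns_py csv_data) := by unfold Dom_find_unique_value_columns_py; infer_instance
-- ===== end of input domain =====

-- B replaces A's column-major nested scan by a single row-major pass over the data rows
-- maintaining per-column state (seen set, duplicate flag, nonempty flag); same asymptotic cost, more idiomatic.

-- ===== PORT A =====
def find_unique_value_columns_py (csv_data : List (List String)) : List String :=
  if csv_data = [] ∨ csv_data.length < 2 then []
  else
    let headers := csv_data.headD []
    let num_columns := headers.length
    (PySem.List.pyRange 0 (num_columns : Int) 1).foldl (fun unique_columns col_idx =>
      let column_values := (PySem.List.pyRange 1 (csv_data.length : Int) 1).foldl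
        (fun cv row_idx =>
          let row := PySem.List.pyGetD csv_data row_idx []
          if col_idx < (row.length : Int) then
            let value := PySem.Str.strip (PySem.List.pyGetD row col_idx "")
            if value ≠ "" then cv ++ [value] else cv
          else cv) []
      if 0 < column_values.length ∧
          column_values.length = PySem.Set.len (PySem.Set.ofList column_values) then
        let col_name := if col_idx < (headers.length : Int) then PySem.List.pyGetD headers col_idx ""
                        else "column_" ++ PySem.Int.toStr col_idx
        unique_columns ++ [col_name]
      else unique_columns) []

-- ===== PORT B =====
-- per-column state: (seen values, has-duplicate flag, has-nonempty-value flag)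
def pvStepCell (s : PySem.Set String × Bool × Bool) (cell : String) :
    PySem.Set String × Bool × Bool :=
  let v := PySem.Str.strip cell
  if v = "" then s
  else if PySem.Set.contains s.1 v then (s.1, true, s.2.2)
  else (PySem.Set.add s.1 v, s.2.1, true)

-- 'for st, cell in zip(state, row)': entries past len(row) are untouched
def pvStepRow (st : List (PySem.Set String × Bool × Bool)) (row : List String) :
    List (PySem.Set String × Bool × Bool) :=
  List.zipWith pvStepCell st row ++ st.drop row.length

def find_unique_value_columns_py_alt (csv_data : List (List String)) : List String :=
  if csv_data = [] ∨ csv_data.length < 2 then []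
  else
    let headers := csv_data.headD []
    let st := csv_data.tail.foldl pvStepRow
      (List.replicate headers.length (PySem.Set.empty, false, false))
    (List.zipWith (fun h s => (h, s)) headers st).filterMap
      (fun p => if p.2.2.2 && !p.2.2.1 then some p.1 else none)

-- ===== PRECONDITION & SPEC =====
def Spec_find_unique_value_columns_py (csv_data : List (List String)) (out : List String) : Prop := out = find_unique_value_columns_py_alt csv_data
instance (csv_data : List (List String)) (out : List String) : Decidable (Spec_find_unique_value_columns_py csv_data out) := by unfold Spec_find_unique_value_columns_py; infer_instance

-- ===== CLAIM (what is proved, stated in full; the proofs are below) =====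
def Claim_equal_find_unique_value_columns_py : Prop := ∀ (csv_data : List (List String)), Dom_find_unique_value_columns_py csv_data → Spec_find_unique_value_columns_py csv_data (find_unique_value_columns_py csv_data)

-- ===== LEMMAS AND PROOFS =====

-- the stripped non-empty values of a list of cells
def pvVals (cells : List String) : List String :=
  cells.filterMap (fun c => let v := PySem.Str.strip c; if v = "" then none else some v)

-- the cells present in column i (ragged rows contribute nothing past their length)
def pvCol (rows : List (List String)) (i : Nat) : List String :=
  rows.filterMap (fun r => r[i]?)

-- should column i's header be kept?
def pvKeep (rows : List (List String)) (i : Nat) : Bool :=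
  !(pvVals (pvCol rows i)).isEmpty && decide (pvVals (pvCol rows i)).Nodup

def pvSpec (headers : List String) (rows : List (List String)) : List String :=
  ((List.range headers.length).filter (fun i => pvKeep rows i)).map (fun i => headers.getD i "")

theorem pv_len_ofList_iff (vs : List String) :
    vs.length = (PySem.Set.ofList vs).length ↔ vs.Nodup := by
  constructor
  · intro hlen
    have hperm : (PySem.Set.ofList vs).Perm vs.dedup := by
      refine (List.perm_ext_iff_of_nodup ?_ (List.nodup_dedup vs)).mpr ?_
      · exact PySem.Set.nodup_ofList vs
      · intro x; simp [PySem.Set.mem_ofList, List.mem_dedup]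
    have h2 : vs.dedup.length = vs.length := by rw [← hperm.length_eq, ← hlen]
    have h3 : vs.dedup = vs := (List.dedup_sublist vs).eq_of_length h2
    rw [← h3]; exact List.nodup_dedup vs
  · intro hnd; rw [PySem.Set.ofList_eq_self_of_nodup vs hnd]

theorem pv_colA (rows : List (List String)) (i : Nat) (acc : List String) :
    rows.foldl (fun cv row =>
      if (i : Int) < (row.length : Int) then
        if PySem.Str.strip (PySem.List.pyGetD row (i : Int) "") ≠ "" then
          cv ++ [PySem.Str.strip (PySem.List.pyGetD row (i : Int) "")]
        else cv
      else cv) acc = acc ++ pvVals (pvCol rows i) := by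
  induction rows generalizing acc with
  | nil => simp [pvVals, pvCol]
  | cons row rows ih =>
    rw [List.foldl_cons]
    by_cases hlt : i < row.length
    · have hcast : ((i : Int) < (row.length : Int)) := by exact_mod_cast hlt
      have hget : PySem.List.pyGetD row (i : Int) "" = row[i] := by
        rw [PySem.List.pyGetD_natCast]
        simp [List.getD_eq_getElem?_getD, List.getElem?_eq_getElem hlt]
      have hcol : pvCol (row :: rows) i = row[i] :: pvCol rows i := by
        simp [pvCol, List.getElem?_eq_getElem hlt]
      rw [if_pos hcast]
      simp only [hget]
      by_cases hv : PySem.Str.strip row[i] = ""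
      · rw [if_neg (by simpa using hv), ih, hcol]
        simp [pvVals, hv]
      · rw [if_pos (by simpa using hv), ih, hcol]
        simp [pvVals, hv, List.append_assoc]
    · have hcast : ¬ ((i : Int) < (row.length : Int)) := by exact_mod_cast hlt
      have hnone : row[i]? = none := by rw [List.getElem?_eq_none_iff]; omega
      have hcol : pvCol (row :: rows) i = pvCol rows i := by
        simp [pvCol, hnone]
      rw [if_neg hcast, ih, hcol]

theorem pv_inner (csv : List (List String)) (ci : Int) :
    (PySem.List.pyRange 1 (csv.length : Int) 1).foldl (fun cv row_idx =>
      if ci < ((PySem.List.pyGetD csv row_idx []).length : Int) then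
        if PySem.Str.strip (PySem.List.pyGetD (PySem.List.pyGetD csv row_idx []) ci "") ≠ "" then
          cv ++ [PySem.Str.strip (PySem.List.pyGetD (PySem.List.pyGetD csv row_idx []) ci "")]
        else cv
      else cv) [] =
    csv.tail.foldl (fun cv row =>
      if ci < (row.length : Int) then
        if PySem.Str.strip (PySem.List.pyGetD row ci "") ≠ "" then
          cv ++ [PySem.Str.strip (PySem.List.pyGetD row ci "")]
        else cv
      else cv) [] := by
  have h := PySem.List.foldl_pyRange_pyGetD' (xs := csv) (d := ([] : List String))
    (f := fun cv row =>
      if ci < (row.length : Int) then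
        if PySem.Str.strip (PySem.List.pyGetD row ci "") ≠ "" then
          cv ++ [PySem.Str.strip (PySem.List.pyGetD row ci "")]
        else cv
      else cv) (init := ([] : List String)) (a := 1) (by norm_num)
  simp only [Int.toNat_one] at h
  rw [List.drop_one] at h
  exact h

theorem pv_A_eq (h : List String) (rows : List (List String)) (hne : rows ≠ []) :
    find_unique_value_columns_py (h :: rows) = pvSpec h rows := by
  have h0 : 0 < rows.length := List.length_pos_of_ne_nil hne
  unfold find_unique_value_columns_py
  rw [if_neg (by simp; omega)]
  simp only [List.headD_cons]
  rw [PySem.List.pyRange_zero_natCast, List.foldl_map]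
  refine Eq.trans (PySem.List.foldl_congr_mem _ _ (fun acc (k : Nat) =>
    if pvKeep rows k = true then acc ++ [h.getD k ""] else acc) _ ?_) ?_
  · intro acc k hk
    have hk' : k < h.length := List.mem_range.mp hk
    rw [pv_inner (h :: rows) (k : Int)]
    simp only [List.tail_cons, pv_colA, List.nil_append]
    have hcond : (0 < (pvVals (pvCol rows k)).length ∧
        ((pvVals (pvCol rows k)).length : Int) =
          PySem.Set.len (PySem.Set.ofList (pvVals (pvCol rows k)))) ↔
        (pvKeep rows k = true) := by
      have hl : PySem.Set.len (PySem.Set.ofList (pvVals (pvCol rows k))) =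
          ((PySem.Set.ofList (pvVals (pvCol rows k))).length : Int) := rfl
      rw [hl, Int.natCast_inj, pv_len_ofList_iff]
      simp [pvKeep, List.length_pos_iff]
    simp only [hcond]
    rw [if_pos (show ((k : Nat) : Int) < (h.length : Int) by exact_mod_cast hk')]
    rw [PySem.List.pyGetD_natCast]
  · rw [PySem.List.foldl_append_if (fun k => pvKeep rows k) (fun k => h.getD k "")]
    simp [pvSpec]

theorem pv_length_stepRow (st : List (PySem.Set String × Bool × Bool)) (row : List String) :
    (pvStepRow st row).length = st.length := by
  simp [pvStepRow]; omega

theorem pv_getD_stepRow (st : List (PySem.Set String × Bool × Bool)) (row : List String)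
    (i : Nat) (hi : i < st.length) (d : PySem.Set String × Bool × Bool) :
    (pvStepRow st row).getD i d =
      match row[i]? with
      | some c => pvStepCell (st.getD i d) c
      | none => st.getD i d := by
  by_cases hr : i < row.length
  · have hz : i < (List.zipWith pvStepCell st row).length := by
      simp [List.length_zipWith]; omega
    have h1 : row[i]? = some row[i] := List.getElem?_eq_getElem hr
    simp [pvStepRow, List.getD_eq_getElem?_getD, List.getElem?_append_left hz,
      List.getElem?_zipWith, h1, List.getElem?_eq_getElem hi]
  · have hlen : (List.zipWith pvStepCell st row).length = row.length := by
      simp [List.length_zipWith]; omega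
    have h1 : row[i]? = none := by
      rw [List.getElem?_eq_none_iff]; omega
    rw [pvStepRow, List.getD_eq_getElem?_getD, List.getElem?_append_right (by omega), hlen]
    simp [h1, List.getD_eq_getElem?_getD, List.getElem?_drop]
    have he : row.length + (i - row.length) = i := by omega
    rw [he]

theorem pv_foldl_stepRow_getD (rows : List (List String))
    (st : List (PySem.Set String × Bool × Bool)) (i : Nat) (hi : i < st.length)
    (d : PySem.Set String × Bool × Bool) :
    (rows.foldl pvStepRow st).getD i d = (pvCol rows i).foldl pvStepCell (st.getD i d) := by
  induction rows generalizing st with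
  | nil => simp [pvCol]
  | cons r rows ih =>
    rw [List.foldl_cons]
    have hi' : i < (pvStepRow st r).length := by rw [pv_length_stepRow]; exact hi
    rw [ih (pvStepRow st r) hi', pv_getD_stepRow st r i hi d]
    cases hc : r[i]? with
    | some c => simp [pvCol, hc]
    | none => simp [pvCol, hc]

theorem pv_length_foldl_stepRow (rows : List (List String))
    (st : List (PySem.Set String × Bool × Bool)) :
    (rows.foldl pvStepRow st).length = st.length := by
  induction rows generalizing st with
  | nil => rfl
  | cons r rows ih => simp [List.foldl_cons, ih, pv_length_stepRow]

theorem pv_cellFold (cells : List String) (u : List String) :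
    cells.foldl pvStepCell (PySem.Set.ofList u, !decide u.Nodup, !u.isEmpty) =
      (PySem.Set.ofList (u ++ pvVals cells), !decide (u ++ pvVals cells).Nodup,
        !(u ++ pvVals cells).isEmpty) := by
  induction cells generalizing u with
  | nil => simp [pvVals]
  | cons c cells ih =>
    rw [List.foldl_cons]
    by_cases hv : PySem.Str.strip c = ""
    · have h1 : pvStepCell (PySem.Set.ofList u, !decide u.Nodup, !u.isEmpty) c =
          (PySem.Set.ofList u, !decide u.Nodup, !u.isEmpty) := by
        simp [pvStepCell, hv]
      have h2 : pvVals (c :: cells) = pvVals cells := by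
        simp [pvVals, hv]
      rw [h1, h2]; exact ih u
    · have h2 : pvVals (c :: cells) = PySem.Str.strip c :: pvVals cells := by
        simp [pvVals, hv]
      by_cases hm : PySem.Str.strip c ∈ u
      · have hc : PySem.Set.contains (PySem.Set.ofList u) (PySem.Str.strip c) = true := by
          rw [PySem.Set.contains_iff, PySem.Set.mem_ofList]; exact hm
        have h1 : pvStepCell (PySem.Set.ofList u, !decide u.Nodup, !u.isEmpty) c =
            (PySem.Set.ofList (u ++ [PySem.Str.strip c]),
              !decide (u ++ [PySem.Str.strip c]).Nodup,
              !(u ++ [PySem.Str.strip c]).isEmpty) := by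
          simp only [pvStepCell, if_neg hv, hc]
          rw [if_pos trivial]
          refine Prod.ext ?_ (Prod.ext ?_ ?_)
          · rw [PySem.Set.ofList_append_singleton,
              PySem.Set.add_of_mem (by rw [PySem.Set.mem_ofList]; exact hm)]
          · simp [List.nodup_append, hm]
          · have hu : u ≠ [] := List.ne_nil_of_mem hm
            cases u with
            | nil => exact absurd rfl hu
            | cons a u => simp
        rw [h1, ih (u ++ [PySem.Str.strip c]), h2]
        simp [List.append_assoc]
      · have hc : PySem.Set.contains (PySem.Set.ofList u) (PySem.Str.strip c) = false := by
          rw [← Bool.not_eq_true, PySem.Set.contains_iff, PySem.Set.mem_ofList]; exact hm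
        have h1 : pvStepCell (PySem.Set.ofList u, !decide u.Nodup, !u.isEmpty) c =
            (PySem.Set.ofList (u ++ [PySem.Str.strip c]),
              !decide (u ++ [PySem.Str.strip c]).Nodup,
              !(u ++ [PySem.Str.strip c]).isEmpty) := by
          simp only [pvStepCell, if_neg hv, hc, Bool.false_eq_true, if_false]
          refine Prod.ext ?_ (Prod.ext ?_ ?_)
          · rw [PySem.Set.ofList_append_singleton]
          · simp [List.nodup_append, hm]
          · simp
        rw [h1, ih (u ++ [PySem.Str.strip c]), h2]
        simp [List.append_assoc]

theorem pv_zip_filterMap {β : Type} (q : β → Bool) (d : β) :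
    ∀ (hs : List String) (st : List β), hs.length = st.length →
    (List.zipWith (fun h s => (h, s)) hs st).filterMap
        (fun p => if q p.2 then some p.1 else none) =
      ((List.range hs.length).filter (fun i => q (st.getD i d))).map (fun i => hs.getD i "") := by
  intro hs
  induction hs with
  | nil => intro st _; simp
  | cons h hs ih =>
    intro st hlen
    match st with
    | [] => simp at hlen
    | s :: st =>
      have hlen' : hs.length = st.length := by simpa using hlen
      rw [List.zipWith_cons_cons, List.filterMap_cons]
      rw [List.length_cons, List.range_succ_eq_map, List.filter_cons]
      have hih := ih st hlen'
      cases hq : q s with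
      | false =>
        simp [hq, hih, List.filter_map, List.map_map, Function.comp_def]
      | true =>
        simp [hq, hih, List.filter_map, List.map_map, Function.comp_def]

theorem pv_B_eq (h : List String) (rows : List (List String)) (hne : rows ≠ []) :
    find_unique_value_columns_py_alt (h :: rows) = pvSpec h rows := by
  have h0 : 0 < rows.length := List.length_pos_of_ne_nil hne
  unfold find_unique_value_columns_py_alt
  rw [if_neg (by simp; omega)]
  simp only [List.headD_cons, List.tail_cons]
  have hlen : h.length =
      (rows.foldl pvStepRow
        (List.replicate h.length (PySem.Set.empty, false, false))).length := by
    rw [pv_length_foldl_stepRow]; simp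
  refine Eq.trans (pv_zip_filterMap (fun s => s.2.2 && !s.2.1)
    (PySem.Set.empty, false, false) h _ hlen) ?_
  unfold pvSpec
  rw [List.filter_congr ?_]
  intro i hi
  have hi' : i < h.length := List.mem_range.mp hi
  have hi2 : i < (List.replicate h.length
      ((PySem.Set.empty : PySem.Set String), false, false)).length := by
    simp [hi']
  rw [pv_foldl_stepRow_getD rows _ i hi2]
  have hrep : (List.replicate h.length
      ((PySem.Set.empty : PySem.Set String), false, false)).getD i
        (PySem.Set.empty, false, false) = (PySem.Set.empty, false, false) := by
    simp [List.getD_eq_getElem?_getD, hi']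
  rw [hrep]
  have heq : ((PySem.Set.empty : PySem.Set String), false, false) =
      (PySem.Set.ofList ([] : List String), !decide ([] : List String).Nodup,
        !([] : List String).isEmpty) := by rfl
  rw [heq, pv_cellFold (pvCol rows i) []]
  simp only [pvKeep, Bool.not_not]
  rfl

-- ===== VERDICT (by name: the statement is the Claim_ definition above) =====
theorem find_unique_value_columns_py_spec : Claim_equal_find_unique_value_columns_py := by
  intro csv _
  unfold Spec_find_unique_value_columns_py
  match csv with
  | [] => rfl
  | [h] => rfl
  | h :: r :: rows =>
    rw [pv_A_eq h (r :: rows) (by simp), pv_B_eq h (r :: rows) (by simp)]
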